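-- pv_equiv track=rewrite | github.com/pthom/litgen | src/srcmlcpp/cpp_types/scope/cpp_scope_process.py | apply_scoped_identifiers_to_code
-- ===== SOURCE A (Python) =====
-- def current_token_matches_scoped_identifier(
--     scoped_identifier_qualified_name: str, current_scope_hierarchy: list[str], current_token: str
-- ) -> bool:
--     """
--     namespace A { enum E { Foo }; }
--     namespace B {
--         enum class  BE { Foo };
--         namespace C {
--             struct S { BE be = BE::Foo; };
--                                  ^
--     }
--     """
--     # scoped_identifier.scope = B::BE
--     # scoped_identifier.identifier = Foo
--     # current_scope = B::C::S
--     # current_token = BE::Foo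
--     # => can access, because
--     #       current_scope[:1] + current_token = B::BE::Foo
--     if current_token.startswith("::"):
--         return False
--
--     for current_scope_prefix in current_scope_hierarchy:
--         current_token_proposed_qualified_name = current_scope_prefix + current_token
--         if current_token_proposed_qualified_name == scoped_identifier_qualified_name:
--             return True
--     return False
--
-- def apply_scoped_identifiers_to_code(
--     cpp_code: str, current_scope_hierarchy: list[str], scoped_identifier_qualified_names: list[str]
-- ) -> str:
--     new_code = ""
--     current_token = ""
--     i = 0
--     in_string = False
--     in_comment = False
--
--     while i < len(cpp_code):
--         char = cpp_code[i]
--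
--         # Check for string literal start/end
--         if char == '"' and not in_comment:
--             in_string = not in_string
--
--         # Check for comment start
--         if char == "/" and i + 1 < len(cpp_code) and cpp_code[i + 1] == "/" and not in_string:
--             in_comment = True
--
--         # Process characters outside strings and comments
--         if not in_string and not in_comment:
--             if char.isalnum() or char == "_":
--                 current_token += char
--             elif char == ":" and i + 1 < len(cpp_code) and cpp_code[i + 1] == ":":
--                 current_token += "::"
--                 i += 1
--             else:
--                 if current_token:
--                     for scoped_identifier_qualified_name in scoped_identifier_qualified_names:
--                         if current_token_matches_scoped_identifier(
--                             scoped_identifier_qualified_name, current_scope_hierarchy, current_token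
--                         ):
--                             current_token = scoped_identifier_qualified_name
--                     new_code += current_token
--                     current_token = ""
--                 new_code += char
--         else:
--             new_code += char
--
--         # Reset in_comment at the end of the line
--         if char == "\n":
--             in_comment = False
--
--         i += 1
--
--     # Add the last token if it exists
--     if current_token:
--         for scoped_identifier_qualified_name in scoped_identifier_qualified_names:
--             if current_token_matches_scoped_identifier(
--                 scoped_identifier_qualified_name, current_scope_hierarchy, current_token
--             ):
--                 current_token = scoped_identifier_qualified_name
--
--         new_code += current_token
--
--     return new_code
-- ===== SOURCE B (Python) =====
-- def _code_mask(cpp_code: str) -> list[bool]: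
--     """Classify each character of cpp_code: True if it lies in plain code,
--     False if it is part of a string literal or a // comment."""
--     mask = []
--     n = len(cpp_code)
--     in_string = False
--     in_comment = False
--     for i, ch in enumerate(cpp_code):
--         if ch == '"' and not in_comment:
--             in_string = not in_string
--         if ch == "/" and not in_string and i + 1 < n and cpp_code[i + 1] == "/":
--             in_comment = True
--         mask.append(not in_string and not in_comment)
--         if ch == "\n":
--             in_comment = False
--     return mask
--
--
-- def _resolve(token: str, current_scope_hierarchy: list[str], scoped_identifier_qualified_names: list[str]) -> str:
--     """Qualify a token: each known qualified name that the token can reach from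
--     the current scope replaces it (so the latest reachable name wins).
--     Absolutely qualified tokens (starting with '::') are left as they are."""
--     for name in scoped_identifier_qualified_names:
--         if token.startswith("::"):
--             break
--         for prefix in current_scope_hierarchy:
--             if prefix + token == name:
--                 token = name
--                 break
--     return token
--
--
-- def apply_scoped_identifiers_to_code(
--     cpp_code: str, current_scope_hierarchy: list[str], scoped_identifier_qualified_names: list[str]
-- ) -> str:
--     is_code = _code_mask(cpp_code)
--     out = []
--     token = ""
--     i = 0
--     n = len(cpp_code)
--     while i < n:
--         ch = cpp_code[i]
--         if not is_code[i]:
--             out.append(ch)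
--         elif ch.isalnum() or ch == "_":
--             token += ch
--         elif ch == ":" and i + 1 < n and cpp_code[i + 1] == ":":
--             token += "::"
--             i += 1
--         else:
--             if token:
--                 out.append(_resolve(token, current_scope_hierarchy, scoped_identifier_qualified_names))
--                 token = ""
--             out.append(ch)
--         i += 1
--     if token:
--         out.append(_resolve(token, current_scope_hierarchy, scoped_identifier_qualified_names))
--     return "".join(out)
-- ===== Notes on version B (the rewrite author's own statement) =====
-- stated objective: alternative
-- what changed: Replaced A's single interleaved character loop (in_string/in_comment state updated inline while tokens accumulate and are emitted) by a two-phase pipeline: a first pass classifies every character as code vs string/comment, and a second pass walks the characters with that mask, accumulating and resolving identifier tokens and copying non-code characters verbatim.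
import Mathlib
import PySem

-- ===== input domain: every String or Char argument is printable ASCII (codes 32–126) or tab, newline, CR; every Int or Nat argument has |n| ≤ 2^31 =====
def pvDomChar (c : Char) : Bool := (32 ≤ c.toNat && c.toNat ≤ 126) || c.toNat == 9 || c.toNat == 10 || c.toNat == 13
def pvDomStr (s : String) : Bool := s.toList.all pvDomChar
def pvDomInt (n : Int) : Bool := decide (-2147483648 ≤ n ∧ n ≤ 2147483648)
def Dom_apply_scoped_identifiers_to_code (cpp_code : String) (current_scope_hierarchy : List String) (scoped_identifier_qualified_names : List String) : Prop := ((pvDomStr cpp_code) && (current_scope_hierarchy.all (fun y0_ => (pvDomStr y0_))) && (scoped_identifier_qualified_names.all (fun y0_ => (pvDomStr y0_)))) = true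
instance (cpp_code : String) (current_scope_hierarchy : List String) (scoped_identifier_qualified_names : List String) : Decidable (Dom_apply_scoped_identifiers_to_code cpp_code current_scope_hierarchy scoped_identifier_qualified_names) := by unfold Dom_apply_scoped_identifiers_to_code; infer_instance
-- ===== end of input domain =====

-- B replaces A's single interleaved character loop by a two-phase pipeline: one pass
-- classifies every character as code / non-code (string or comment), a second pass
-- rewrites identifier tokens over the classified characters; same cost ("alternative").


-- ===== PORT A =====

-- current_token_matches_scoped_identifier (helper of A)
def pvCtmsA (scoped_identifier_qualified_name : String) (current_scope_hierarchy : List String) (current_token : String) : Bool :=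
  if PySem.Str.startswith current_token "::" then false
  else current_scope_hierarchy.any (fun prefix_ => prefix_ ++ current_token == scoped_identifier_qualified_name)

-- A's inner 'for name in names: if matches: current_token = name' loop
def pvResolveA (hier names : List String) (tok : String) : String :=
  names.foldl (fun t n => if pvCtmsA n hier t then n else t) tok

-- A's while-loop over the characters; state = (new_code, current_token, in_string, in_comment)
def pvLoopA (hier names : List String) : List Char → List Char → List Char → Bool → Bool → List Char
  | [], nc, tok, _, _ =>
      if tok.isEmpty then nc else nc ++ (pvResolveA hier names (String.ofList tok)).toList
  | c :: rest, nc, tok, in_string, in_comment =>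
      let in_string' := if c = '"' ∧ in_comment = false then !in_string else in_string
      let in_comment' := if c = '/' ∧ rest.head? = some '/' ∧ in_string' = false then true else in_comment
      if in_string' = false ∧ in_comment' = false then
        if PySem.Chars.isalnum c = true ∨ c = '_' then
          pvLoopA hier names rest nc (tok ++ [c]) in_string' (if c = '\n' then false else in_comment')
        else if c = ':' ∧ rest.head? = some ':' then
          pvLoopA hier names rest.tail nc (tok ++ [':', ':']) in_string' (if c = '\n' then false else in_comment')
        else
          let nc' := if tok.isEmpty then nc else nc ++ (pvResolveA hier names (String.ofList tok)).toList
          pvLoopA hier names rest (nc' ++ [c]) [] in_string' (if c = '\n' then false else in_comment')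
      else
        pvLoopA hier names rest (nc ++ [c]) tok in_string' (if c = '\n' then false else in_comment')
  termination_by cs => cs.length
  decreasing_by all_goals (simp only [List.length_cons, List.length_tail]; omega)

def apply_scoped_identifiers_to_code (cpp_code : String) (current_scope_hierarchy : List String) (scoped_identifier_qualified_names : List String) : String :=
  String.ofList (pvLoopA current_scope_hierarchy scoped_identifier_qualified_names cpp_code.toList [] [] false false)

-- ===== PORT B =====

-- B's _code_mask: one pass classifying each character (true = plain code)
def pvMaskB : List Char → Bool → Bool → List Bool
  | [], _, _ => []
  | c :: rest, in_string, in_comment =>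
      let s := if c = '"' ∧ in_comment = false then !in_string else in_string
      let k := if c = '/' ∧ rest.head? = some '/' ∧ s = false then true else in_comment
      (!s && !k) :: pvMaskB rest s (if c = '\n' then false else k)

-- B's _resolve: scan the names, replacing the token on a reachable name;
-- an absolutely qualified token ('::…') stops the scan
def pvResolveB (hier : List String) : List String → String → String
  | [], tok => tok
  | name :: ns, tok =>
      if PySem.Str.startswith tok "::" then tok
      else if hier.any (fun prefix_ => prefix_ ++ tok == name) then pvResolveB hier ns name
      else pvResolveB hier ns tok

-- 'if token: out.append(_resolve(token,…))' — the contribution of a pending token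
def pvFlushB (hier names : List String) (pending : List Char) : List Char :=
  if pending.isEmpty then [] else (pvResolveB hier names (String.ofList pending)).toList

def pvIdentCharB (c : Char) : Bool := PySem.Chars.isalnum c || c == '_'

-- B's rewrite loop over the characters and their mask, in lockstep
def pvRewriteB (hier names : List String) : List Char → List Bool → List Char → List Char
  | [], _, tok => pvFlushB hier names tok
  | c :: rest, m, tok =>
      if m.headD true = false then
        c :: pvRewriteB hier names rest m.tail tok
      else if pvIdentCharB c then
        pvRewriteB hier names rest m.tail (tok ++ [c])
      else if c = ':' ∧ rest.head? = some ':' then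
        pvRewriteB hier names rest.tail m.tail.tail (tok ++ [':', ':'])
      else
        pvFlushB hier names tok ++ c :: pvRewriteB hier names rest m.tail []
  termination_by cs => cs.length
  decreasing_by all_goals (simp only [List.length_cons, List.length_tail]; omega)

def apply_scoped_identifiers_to_code_alt (cpp_code : String) (current_scope_hierarchy : List String) (scoped_identifier_qualified_names : List String) : String :=
  String.ofList (pvRewriteB current_scope_hierarchy scoped_identifier_qualified_names cpp_code.toList (pvMaskB cpp_code.toList false false) [])

-- ===== PRECONDITION & SPEC =====
def Spec_apply_scoped_identifiers_to_code (cpp_code : String) (current_scope_hierarchy : List String) (scoped_identifier_qualified_names : List String) (out : String) : Prop := out = apply_scoped_identifiers_to_code_alt cpp_code current_scope_hierarchy scoped_identifier_qualified_names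
instance (cpp_code : String) (current_scope_hierarchy : List String) (scoped_identifier_qualified_names : List String) (out : String) : Decidable (Spec_apply_scoped_identifiers_to_code cpp_code current_scope_hierarchy scoped_identifier_qualified_names out) := by unfold Spec_apply_scoped_identifiers_to_code; infer_instance

-- ===== CLAIM (what is proved, stated in full; the proofs are below) =====
def Claim_equal_apply_scoped_identifiers_to_code : Prop := ∀ (cpp_code : String) (current_scope_hierarchy : List String) (scoped_identifier_qualified_names : List String), Dom_apply_scoped_identifiers_to_code cpp_code current_scope_hierarchy scoped_identifier_qualified_names → Spec_apply_scoped_identifiers_to_code cpp_code current_scope_hierarchy scoped_identifier_qualified_names (apply_scoped_identifiers_to_code cpp_code current_scope_hierarchy scoped_identifier_qualified_names)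

-- ===== LEMMAS AND PROOFS =====

theorem pvResolveB_abs (hier ns : List String) (tok : String)
    (h : PySem.Chars.startswith tok.toList [':', ':'] = true) : pvResolveB hier ns tok = tok := by
  cases ns with
  | nil => rfl
  | cons n ns => simp [pvResolveB, h]

theorem pvResolve_eq (hier names : List String) (tok : String) :
    pvResolveA hier names tok = pvResolveB hier names tok := by
  induction names generalizing tok with
  | nil => rfl
  | cons n ns ih =>
      cases hs : PySem.Chars.startswith tok.toList [':', ':'] with
      | true =>
          have hA : pvResolveA hier (n :: ns) tok = pvResolveA hier ns tok := by
            simp [pvResolveA, pvCtmsA, hs]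
          rw [hA, ih, pvResolveB_abs hier ns tok hs]
          simp [pvResolveB, hs]
      | false =>
          by_cases ha : ∃ x ∈ hier, x ++ tok = n
          · have hA : pvResolveA hier (n :: ns) tok = pvResolveA hier ns n := by
              simp [pvResolveA, pvCtmsA, hs, ha]
            rw [hA, ih]
            simp [pvResolveB, hs, ha]
          · have hA : pvResolveA hier (n :: ns) tok = pvResolveA hier ns tok := by
              simp [pvResolveA, pvCtmsA, hs, ha]
            rw [hA, ih]
            simp [pvResolveB, hs, ha]

theorem pvFlush_eq (hier names : List String) (nc tok : List Char) :
    (if tok.isEmpty then nc else nc ++ (pvResolveA hier names (String.ofList tok)).toList)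
      = nc ++ pvFlushB hier names tok := by
  unfold pvFlushB
  by_cases h : tok.isEmpty <;> simp [h, pvResolve_eq]

set_option maxRecDepth 4000 in
-- main invariant: A's scanner from any state equals B's rewrite over B's mask from that state
theorem pvLoopA_eq_rewrite (hier names : List String) :
    ∀ (cs nc tok : List Char) (s k : Bool),
      pvLoopA hier names cs nc tok s k
        = nc ++ pvRewriteB hier names cs (pvMaskB cs s k) tok := by
  intro cs nc tok s k
  fun_induction pvLoopA hier names cs nc tok s k with
  | case1 nc tok s k h =>
      simp [pvRewriteB, pvMaskB, pvFlushB, h]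
  | case2 nc tok s k h =>
      simp [pvRewriteB, pvMaskB, pvFlushB, h, pvResolve_eq]
  | case3 c rest nc tok s k s' k' h1 h2 ih =>
      -- code mode, identifier char
      have hs' : s' = (if c = '"' ∧ k = false then !s else s) := rfl
      have hk' : k' = (if c = '/' ∧ rest.head? = some '/' ∧ s' = false then true else k) := rfl
      clear_value s' k'
      simp only [dite_eq_ite] at ih
      obtain ⟨hs0, hk0⟩ := h1
      have hid : pvIdentCharB c = true := by rcases h2 with h | h <;> simp [pvIdentCharB, h]
      have hmask : pvMaskB (c :: rest) s k
          = (!s' && !k') :: pvMaskB rest s' (if c = '\n' then false else k') := by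
        simp only [pvMaskB]; rw [← hs', ← hk']
      rw [ih, hmask]
      simp [pvRewriteB, hs0, hk0, hid]
  | case4 c rest nc tok s k s' k' h1 h2 h3 ih =>
      -- code mode, '::' pair
      have hs' : s' = (if c = '"' ∧ k = false then !s else s) := rfl
      have hk' : k' = (if c = '/' ∧ rest.head? = some '/' ∧ s' = false then true else k) := rfl
      clear_value s' k'
      simp only [dite_eq_ite] at ih
      obtain ⟨hs0, hk0⟩ := h1
      obtain ⟨hc, hh⟩ := h3
      subst hc
      obtain ⟨t, rfl⟩ : ∃ t, rest = ':' :: t := by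
        cases rest with
        | nil => simp at hh
        | cons a t => simp only [List.head?_cons, Option.some.injEq] at hh; exact ⟨t, by rw [hh]⟩
      have hmask : pvMaskB (':' :: ':' :: t) s k
          = (!s' && !k') :: pvMaskB (':' :: t) s' (if (':' : Char) = '\n' then false else k') := by
        simp only [pvMaskB]; rw [← hs', ← hk']
      rw [ih, hmask]
      have hident : pvIdentCharB ':' = false := by decide
      simp [pvRewriteB, pvMaskB, hs0, hk0, hident]
  | case5 c rest nc tok s k s' k' h1 h2 h3 nc' ih =>
      -- code mode, other char: flush point
      have hs' : s' = (if c = '"' ∧ k = false then !s else s) := rfl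
      have hk' : k' = (if c = '/' ∧ rest.head? = some '/' ∧ s' = false then true else k) := rfl
      have hnc' : nc' = (if tok.isEmpty then nc else nc ++ (pvResolveA hier names (String.ofList tok)).toList) := rfl
      clear_value s' k' nc'
      simp only [dite_eq_ite] at ih
      obtain ⟨hs0, hk0⟩ := h1
      have hident : pvIdentCharB c = false := by
        simp only [pvIdentCharB, Bool.or_eq_false_iff, beq_eq_false_iff_ne, ne_eq]
        constructor
        · cases hia : PySem.Chars.isalnum c
          · rfl
          · exact absurd (Or.inl hia) h2
        · intro hc; exact h2 (Or.inr hc)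
      have hmask : pvMaskB (c :: rest) s k
          = (!s' && !k') :: pvMaskB rest s' (if c = '\n' then false else k') := by
        simp only [pvMaskB]; rw [← hs', ← hk']
      rw [ih, hmask, hnc', pvFlush_eq]
      rw [pvRewriteB]
      subst hs0; subst hk0
      simp only [Bool.not_false, Bool.and_self, List.headD_cons, List.tail_cons, hident,
        Bool.true_eq_false, Bool.false_eq_true, if_false, ite_self]
      rw [if_neg h3]
      simp only [List.append_assoc, List.singleton_append]
  | case6 c rest nc tok s k s' k' h ih =>
      -- string or comment mode: copy verbatim
      have hs' : s' = (if c = '"' ∧ k = false then !s else s) := rfl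
      have hk' : k' = (if c = '/' ∧ rest.head? = some '/' ∧ s' = false then true else k) := rfl
      clear_value s' k'
      simp only [dite_eq_ite] at ih
      have hbit : (!s' && !k') = false := by
        cases s'
        · cases k'
          · exact absurd ⟨rfl, rfl⟩ h
          · rfl
        · rfl
      have hmask : pvMaskB (c :: rest) s k
          = (!s' && !k') :: pvMaskB rest s' (if c = '\n' then false else k') := by
        simp only [pvMaskB]; rw [← hs', ← hk']
      rw [ih, hmask]
      simp [pvRewriteB, hbit, List.append_assoc]

-- ===== VERDICT (by name: the statement is the Claim_ definition above) =====
theorem apply_scoped_identifiers_to_code_spec : Claim_equal_apply_scoped_identifiers_to_code := by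
  intro cpp hier names _
  unfold Spec_apply_scoped_identifiers_to_code apply_scoped_identifiers_to_code apply_scoped_identifiers_to_code_alt
  rw [pvLoopA_eq_rewrite]
  simp
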